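-- pv_equiv track=rewrite | github.com/Bhaskar2025/python_practice | dsa/hashing/CountDuplicatePairs.py | count_duplicate_pairs
-- ===== SOURCE A (Python) =====
-- def count_duplicate_pairs(arr):
--     freq = {}
--     count = 0
--     for val in arr:
--         if val in freq:
--             count += freq.get(val)
--         freq[val] = freq.get(val, 0) + 1
--     return count
-- ===== SOURCE B (Python) =====
-- def count_duplicate_pairs(arr):
--     freq = {}
--     for val in arr:
--         freq[val] = freq.get(val, 0) + 1
--     return sum(c * (c - 1) // 2 for c in freq.values())
-- ===== Notes on version B (the rewrite author's own statement) =====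
-- stated objective: alternative
-- what changed: Instead of accumulating pair counts incrementally while scanning, B first builds the full frequency table and then sums the closed form c*(c-1)//2 over the distinct counts.
import Mathlib
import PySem

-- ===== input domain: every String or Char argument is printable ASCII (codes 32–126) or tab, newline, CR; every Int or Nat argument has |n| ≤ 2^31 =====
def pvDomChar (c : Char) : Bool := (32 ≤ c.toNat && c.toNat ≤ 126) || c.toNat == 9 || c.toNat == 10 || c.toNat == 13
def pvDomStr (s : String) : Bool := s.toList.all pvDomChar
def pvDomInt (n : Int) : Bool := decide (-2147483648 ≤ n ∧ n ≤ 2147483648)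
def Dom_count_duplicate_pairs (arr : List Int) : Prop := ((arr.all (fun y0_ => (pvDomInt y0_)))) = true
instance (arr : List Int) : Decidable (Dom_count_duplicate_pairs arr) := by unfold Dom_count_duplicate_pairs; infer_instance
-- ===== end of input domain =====

-- B replaces A's incremental accumulate-pairs-while-scanning with a two-phase
-- build-frequency-table-then-sum-the-closed-form c*(c-1)//2 computation (alternative decomposition).

-- ===== PORT A =====
-- A: one pass; before each insertion, if val is already a key, add its current count.
def count_duplicate_pairs (arr : List Int) : Int :=
  (arr.foldl
    (fun (s : PySem.Dict Int Int × Int) val =>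
      let count := if s.1.contains val then s.2 + (s.1.get? val).getD 0 else s.2
      (s.1.insert val (s.1.getD val 0 + 1), count))
    (PySem.Dict.empty, 0)).2

-- ===== PORT B =====
-- B: build the frequency dict, then sum c*(c-1)//2 over its values.
def count_duplicate_pairs_alt (arr : List Int) : Int :=
  let freq := arr.foldl (fun (d : PySem.Dict Int Int) val => d.insert val (d.getD val 0 + 1))
    PySem.Dict.empty
  (freq.values.map (fun c => PySem.Int.floordiv (c * (c - 1)) 2)).sum

-- ===== PRECONDITION & SPEC =====
def Spec_count_duplicate_pairs (arr : List Int) (out : Int) : Prop := out = count_duplicate_pairs_alt arr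
instance (arr : List Int) (out : Int) : Decidable (Spec_count_duplicate_pairs arr out) := by unfold Spec_count_duplicate_pairs; infer_instance

-- ===== CLAIM (what is proved, stated in full; the proofs are below) =====
def Claim_equal_count_duplicate_pairs : Prop := ∀ (arr : List Int), Dom_count_duplicate_pairs arr → Spec_count_duplicate_pairs arr (count_duplicate_pairs arr)

-- ===== LEMMAS AND PROOFS =====

-- the closed form B sums per value
def pvFbin (c : Int) : Int := PySem.Int.floordiv (c * (c - 1)) 2

-- the binomial sum over a dict's values
def pvSb (d : PySem.Dict Int Int) : Int := (d.values.map pvFbin).sum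

def pvStepD (d : PySem.Dict Int Int) (val : Int) : PySem.Dict Int Int :=
  d.insert val (d.getD val 0 + 1)

lemma pvFbin_succ (n : Int) : pvFbin (n + 1) = pvFbin n + n := by
  unfold pvFbin
  rw [PySem.Int.floordiv_eq_ediv_of_pos (by omega), PySem.Int.floordiv_eq_ediv_of_pos (by omega)]
  have h : (n + 1) * (n + 1 - 1) = n * (n - 1) + n * 2 := by ring
  rw [h, Int.add_mul_ediv_right _ _ (by omega)]

-- replacing g by g' at the single (Nodup) occurrence of v shifts the sum by g' v - g v
lemma pvSum_map_update (g g' : Int → Int) (l : List Int) (v : Int)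
    (hnd : l.Nodup) (hv : v ∈ l) (hoff : ∀ k, k ≠ v → g' k = g k) :
    (l.map g').sum = (l.map g).sum + (g' v - g v) := by
  induction l with
  | nil => cases hv
  | cons x xs ih =>
    rcases List.mem_cons.mp hv with h | h
    · subst h
      have : xs.map g' = xs.map g := by
        apply List.map_congr_left
        intro k hk
        exact hoff k (fun he => (List.nodup_cons.mp hnd).1 (he ▸ hk))
      simp [this]; ring
    · have hx : x ≠ v := fun he => (List.nodup_cons.mp hnd).1 (he ▸ h)
      simp only [List.map_cons, List.sum_cons, ih (List.nodup_cons.mp hnd).2 h, hoff x hx]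
      ring

lemma pvSb_step (d : PySem.Dict Int Int) (val : Int) (hnd : d.keys.Nodup) :
    pvSb (pvStepD d val) = pvSb d + d.getD val 0 := by
  unfold pvSb pvStepD
  by_cases hc : d.contains val = true
  · have hk : (d.insert val (d.getD val 0 + 1)).keys = d.keys :=
      PySem.Dict.keys_insert_of_contains d _ hc
    have hnd' : (d.insert val (d.getD val 0 + 1)).keys.Nodup := hk ▸ hnd
    rw [PySem.Dict.values_eq_map_keys _ hnd' 0, PySem.Dict.values_eq_map_keys d hnd 0,
        hk, List.map_map, List.map_map]
    have hv : val ∈ d.keys := (PySem.Dict.contains_iff_mem_keys d val).mp hc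
    rw [pvSum_map_update (pvFbin ∘ fun k => d.getD k 0)
        (pvFbin ∘ fun k => (d.insert val (d.getD val 0 + 1)).getD k 0) d.keys val hnd hv
        (fun k hk' => by simp [PySem.Dict.getD_insert_of_ne d _ _ hk'])]
    simp [PySem.Dict.getD_insert_self, pvFbin_succ]
  · have hc' : d.contains val = false := by simpa using hc
    have hk : (d.insert val (d.getD val 0 + 1)).keys = d.keys ++ [val] :=
      PySem.Dict.keys_insert_of_not_contains d _ hc'
    have hnd' : (d.insert val (d.getD val 0 + 1)).keys.Nodup :=
      PySem.Dict.nodup_keys_insert d val _ hnd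
    have hv0 : d.getD val 0 = 0 := PySem.Dict.getD_of_not_contains d 0 hc'
    rw [PySem.Dict.values_eq_map_keys _ hnd' 0, PySem.Dict.values_eq_map_keys d hnd 0, hk]
    have hmap : (d.keys ++ [val]).map (fun k => (d.insert val (d.getD val 0 + 1)).getD k 0)
        = d.keys.map (fun k => d.getD k 0) ++ [d.getD val 0 + 1] := by
      rw [List.map_append]
      congr 1
      · apply List.map_congr_left
        intro k hk'
        have hne : k ≠ val := fun he =>
          hc ((PySem.Dict.contains_iff_mem_keys d val).mpr (he ▸ hk'))
        exact PySem.Dict.getD_insert_of_ne d _ _ hne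
      · simp [PySem.Dict.getD_insert_self]
    rw [hmap, hv0, List.map_append, List.sum_append]
    have h1 : pvFbin 1 = 0 := by decide
    simp [h1]

-- A's per-step count increment is d.getD val 0 in both branches
lemma pvStepA_count (d : PySem.Dict Int Int) (c val : Int) :
    (if d.contains val then c + (d.get? val).getD 0 else c) = c + d.getD val 0 := by
  by_cases hc : d.contains val = true
  · simp [hc, PySem.Dict.getD_eq_get?_getD]
  · have hc' : d.contains val = false := by simpa using hc
    simp [hc', PySem.Dict.getD_of_not_contains d 0 hc']

-- main loop invariant: A's running count accumulates exactly the change in the binomial sum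
lemma pvLoop_eq : ∀ (l : List Int) (d : PySem.Dict Int Int) (c : Int), d.keys.Nodup →
    (l.foldl
      (fun (s : PySem.Dict Int Int × Int) val =>
        let count := if s.1.contains val then s.2 + (s.1.get? val).getD 0 else s.2
        (s.1.insert val (s.1.getD val 0 + 1), count))
      (d, c)).2
    = c + pvSb (l.foldl pvStepD d) - pvSb d := by
  intro l
  induction l with
  | nil => intro d c _; simp
  | cons x xs ih =>
    intro d c hnd
    have hnd' : (pvStepD d x).keys.Nodup := PySem.Dict.nodup_keys_insert d x _ hnd
    simp only [List.foldl_cons]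
    rw [pvStepA_count d c x]
    have hih := ih (pvStepD d x) (c + d.getD x 0) hnd'
    have hs := pvSb_step d x hnd
    simp only [pvStepD] at hih hs ⊢
    rw [hih, hs]
    ring

-- ===== VERDICT (by name: the statement is the Claim_ definition above) =====
theorem count_duplicate_pairs_spec : Claim_equal_count_duplicate_pairs := by
  intro arr _
  unfold Spec_count_duplicate_pairs count_duplicate_pairs count_duplicate_pairs_alt
  have h := pvLoop_eq arr PySem.Dict.empty 0 PySem.Dict.nodup_keys_empty
  have he : pvSb PySem.Dict.empty = (0 : Int) := by decide
  rw [h, he]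
  simp only [zero_add, sub_zero]
  rfl
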